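-- pv_equiv track=rewrite | github.com/Liza-IITP/Data_Structures | Main/Problems.py | generate_rhombus
-- ===== SOURCE A (Python) =====
-- n = 5
--
-- def generate_rhombus(n):
--
--     list_op = []
--     x = 2*n-1
--     for i in range(1,n+1):
--         list_op.append(" "*(x//2-i+1) + "*"*i + " "*(x//2-i+1))
--     for i in range(n-1,0,-1):
--         list_op.append(" "*(x//2-i+1) + "*"*i + " "*(x//2-i+1))
--     return list_op
-- ===== SOURCE B (Python) =====
-- def generate_rhombus(n):
--     m = n - 1
--     return [" " * abs(r - m) + "*" * (n - abs(r - m)) + " " * abs(r - m)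
--             for r in range(2 * n - 1)]
-- ===== Notes on version B (the rewrite author's own statement) =====
-- stated objective: alternative
-- what changed: B replaces A's two independent generation loops (ascending then descending star counts) by a single pass over all 2n-1 row indices r, computing each row directly from the distance abs(r-(n-1)) to the middle row.
import Mathlib
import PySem

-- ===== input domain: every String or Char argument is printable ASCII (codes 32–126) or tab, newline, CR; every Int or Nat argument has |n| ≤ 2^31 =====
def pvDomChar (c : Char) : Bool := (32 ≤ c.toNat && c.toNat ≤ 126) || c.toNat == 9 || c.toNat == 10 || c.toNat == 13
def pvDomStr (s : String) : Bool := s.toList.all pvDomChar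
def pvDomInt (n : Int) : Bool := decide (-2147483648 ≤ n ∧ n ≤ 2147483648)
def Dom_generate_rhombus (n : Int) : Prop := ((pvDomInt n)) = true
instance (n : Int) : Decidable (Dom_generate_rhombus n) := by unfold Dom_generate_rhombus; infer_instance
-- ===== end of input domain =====

-- B computes every row in one pass over all 2n-1 row indices from the distance to the middle row (alternative decomposition, same cost).

-- ===== PORT A =====
-- literal port of A: two generation loops appending rows, padding computed as x//2 - i + 1
def generate_rhombus (n : Int) : List String :=
  let x : Int := 2 * n - 1
  let list_op : List String :=
    (PySem.List.pyRange 1 (n + 1) 1).foldl (fun acc i =>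
      acc ++ [String.mk (PySem.List.pyRepeat [' '] (PySem.Int.floordiv x 2 - i + 1)
        ++ PySem.List.pyRepeat ['*'] i
        ++ PySem.List.pyRepeat [' '] (PySem.Int.floordiv x 2 - i + 1))]) []
  (PySem.List.pyRange (n - 1) 0 (-1)).foldl (fun acc i =>
      acc ++ [String.mk (PySem.List.pyRepeat [' '] (PySem.Int.floordiv x 2 - i + 1)
        ++ PySem.List.pyRepeat ['*'] i
        ++ PySem.List.pyRepeat [' '] (PySem.Int.floordiv x 2 - i + 1))]) list_op

-- ===== PORT B =====
-- literal port of B: one comprehension over range(2n-1), row built from abs(r - m);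
-- Python's abs on int is ported exactly as Int's |·|
def generate_rhombus_alt (n : Int) : List String :=
  let m : Int := n - 1
  (PySem.List.pyRange 0 (2 * n - 1) 1).map (fun r =>
    String.mk (PySem.List.pyRepeat [' '] |r - m|
      ++ PySem.List.pyRepeat ['*'] (n - |r - m|)
      ++ PySem.List.pyRepeat [' '] |r - m|))

-- ===== PRECONDITION & SPEC =====
def Spec_generate_rhombus (n : Int) (out : List String) : Prop := out = generate_rhombus_alt n
instance (n : Int) (out : List String) : Decidable (Spec_generate_rhombus n out) := by unfold Spec_generate_rhombus; infer_instance

-- ===== CLAIM =====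
def Claim_equal_generate_rhombus : Prop := ∀ (n : Int), Dom_generate_rhombus n → Spec_generate_rhombus n (generate_rhombus n)

-- ===== LEMMAS AND PROOFS =====

-- A-style row: padding n - i, i stars
def pvRow (n i : Int) : String :=
  String.mk (PySem.List.pyRepeat [' '] (n - i)
    ++ PySem.List.pyRepeat ['*'] i
    ++ PySem.List.pyRepeat [' '] (n - i))

-- B-style row at index r
def pvRowB (n r : Int) : String :=
  String.mk (PySem.List.pyRepeat [' '] |r - (n - 1)|
    ++ PySem.List.pyRepeat ['*'] (n - |r - (n - 1)|)
    ++ PySem.List.pyRepeat [' '] |r - (n - 1)|)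

theorem pvRowB_eq (n r : Int) : pvRowB n r = pvRow n (n - |r - (n - 1)|) := by
  unfold pvRowB pvRow
  rw [show n - (n - |r - (n - 1)|) = |r - (n - 1)| by ring]

-- A's padding (2*n-1)//2 - i + 1 equals n - i for every integer n
theorem pvRowA_eq (n i : Int) :
    String.mk (PySem.List.pyRepeat [' '] (PySem.Int.floordiv (2 * n - 1) 2 - i + 1)
      ++ PySem.List.pyRepeat ['*'] i
      ++ PySem.List.pyRepeat [' '] (PySem.Int.floordiv (2 * n - 1) 2 - i + 1)) = pvRow n i := by
  have h : PySem.Int.floordiv (2 * n - 1) 2 = n - 1 := by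
    rw [PySem.Int.floordiv_eq_iff_of_pos (by omega)]; omega
  have h2 : PySem.Int.floordiv (2 * n - 1) 2 - i + 1 = n - i := by rw [h]; ring
  unfold pvRow
  rw [h2]

theorem pvTop_eq (n : Int) (hn : 1 ≤ n) :
    (PySem.List.pyRange 0 n 1).map (pvRowB n)
      = (PySem.List.pyRange 1 (n + 1) 1).map (pvRow n) := by
  rw [PySem.List.pyRange_one 0 n, PySem.List.pyRange_one 1 (n + 1)]
  rw [List.map_map, List.map_map]
  have hlen : (n - 0).toNat = (n + 1 - 1).toNat := by omega
  rw [hlen]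
  apply List.map_congr_left
  intro k hk
  rw [List.mem_range] at hk
  have hk' : (k : Int) ≤ n - 1 := by omega
  simp only [Function.comp]
  rw [pvRowB_eq]
  rw [show n - |(0 : Int) + (k : Int) - (n - 1)| = 1 + (k : Int) by
    rw [abs_of_nonpos (by omega)]; ring]

theorem pvBot_eq (n : Int) (hn : 1 ≤ n) :
    (PySem.List.pyRange n (2 * n - 1) 1).map (pvRowB n)
      = (PySem.List.pyRange (n - 1) 0 (-1)).map (pvRow n) := by
  rw [PySem.List.pyRange_one n (2 * n - 1), PySem.List.pyRange_neg_one (n - 1) 0]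
  rw [List.map_map, List.map_map]
  have hlen : (2 * n - 1 - n).toNat = (n - 1 - 0).toNat := by omega
  rw [hlen]
  apply List.map_congr_left
  intro k _
  simp only [Function.comp]
  rw [pvRowB_eq]
  rw [show n - |n + (k : Int) - (n - 1)| = n - 1 - (k : Int) by
    rw [abs_of_nonneg (by omega)]; ring]

theorem generate_rhombus_eq (n : Int) : generate_rhombus n = generate_rhombus_alt n := by
  by_cases h : n ≤ 0
  · simp only [generate_rhombus, generate_rhombus_alt]
    rw [PySem.List.pyRange_one_eq_nil (by omega : n + 1 ≤ 1),
        PySem.List.pyRange_neg_one_eq_nil (by omega : n - 1 ≤ 0),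
        PySem.List.pyRange_one_eq_nil (by omega : 2 * n - 1 ≤ 0)]
    simp
  · have hn : 1 ≤ n := by omega
    simp only [generate_rhombus, generate_rhombus_alt,
      PySem.List.foldl_append_singleton_eq_map, List.nil_append, pvRowA_eq]
    rw [show (fun r => String.mk (PySem.List.pyRepeat [' '] |r - (n - 1)|
          ++ PySem.List.pyRepeat ['*'] (n - |r - (n - 1)|)
          ++ PySem.List.pyRepeat [' '] |r - (n - 1)|)) = pvRowB n from rfl]
    rw [PySem.List.pyRange_one_append 0 n (2 * n - 1) (by omega) (by omega),
        List.map_append, pvTop_eq n hn, pvBot_eq n hn]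

-- ===== VERDICT =====
theorem generate_rhombus_spec : Claim_equal_generate_rhombus := by
  intro n _
  unfold Spec_generate_rhombus
  exact generate_rhombus_eq n
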